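-- pv_equiv track=rewrite | github.com/Lorenz230/HAI-Coursework | handle_bookings.py | extract_restaurant_type
-- ===== SOURCE A (Python) =====
-- def extract_restaurant_type(tags):
--     word = None
--     capturing = False
--     for word, tag in tags:
--         if tag in {'DT', 'VB', 'VBP', 'VBZ'}:  # Start capturing after trigger
--             capturing = True
--         elif capturing:
--             if tag in {'JJ', 'NN'}:  # Capture adjective or noun
--                 return word
--     return None
-- ===== SOURCE B (Python) =====
-- def extract_restaurant_type(tags):
--     pairs = list(enumerate(tags))
--     trigger_idxs = [i for i, (_, t) in pairs if t in ('DT', 'VB', 'VBP', 'VBZ')]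
--     if not trigger_idxs:
--         return None
--     first = trigger_idxs[0]
--     hits = [w for i, (w, t) in pairs if first < i and t in ('JJ', 'NN')]
--     return hits[0] if hits else None
-- ===== Notes on version B (the rewrite author's own statement) =====
-- stated objective: alternative
-- what changed: Replaces the stateful single scan with a `capturing` flag by a declarative index computation: enumerate the tags, collect all trigger indices, and return the first target-tagged word whose index exceeds the first trigger index.
import Mathlib
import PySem

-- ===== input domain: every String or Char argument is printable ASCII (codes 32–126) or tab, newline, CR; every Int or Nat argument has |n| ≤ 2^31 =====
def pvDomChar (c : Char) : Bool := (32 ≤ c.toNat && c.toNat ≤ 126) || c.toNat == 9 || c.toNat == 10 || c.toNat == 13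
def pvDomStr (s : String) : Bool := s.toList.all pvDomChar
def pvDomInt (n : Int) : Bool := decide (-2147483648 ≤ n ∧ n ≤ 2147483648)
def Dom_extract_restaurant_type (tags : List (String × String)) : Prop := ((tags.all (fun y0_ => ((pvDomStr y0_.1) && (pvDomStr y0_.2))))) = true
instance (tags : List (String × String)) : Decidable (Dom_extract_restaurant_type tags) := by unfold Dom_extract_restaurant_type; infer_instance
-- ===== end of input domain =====

-- B replaces A's stateful scan (a `capturing` flag) by a declarative index computation:
-- enumerate the tags, collect the trigger indices, return the first target word after the
-- first trigger index. Objective: alternative formulation; A = B everywhere.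

-- ===== PORT A =====
def pvIsTrigger (t : String) : Bool := t == "DT" || t == "VB" || t == "VBP" || t == "VBZ"

def pvIsNounAdj (t : String) : Bool := t == "JJ" || t == "NN"

-- A's for-loop, with the `capturing` flag as state
def pvGoA : List (String × String) → Bool → Option String
  | [], _ => none
  | (w, t) :: rest, cap =>
    if pvIsTrigger t then pvGoA rest true
    else if cap then
      (if pvIsNounAdj t then some w else pvGoA rest cap)
    else pvGoA rest cap

def extract_restaurant_type (tags : List (String × String)) : Option String :=
  pvGoA tags false

-- ===== PORT B =====
def extract_restaurant_type_alt (tags : List (String × String)) : Option String :=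
  let pairs := PySem.List.enumerate tags
  let trigger_idxs := (pairs.filter (fun p => pvIsTrigger p.2.2)).map (·.1)
  match trigger_idxs with
  | [] => none
  | first :: _ =>
    let hits := (pairs.filter (fun p => decide (first < p.1) && pvIsNounAdj p.2.2)).map (fun p => p.2.1)
    match hits with
    | [] => none
    | w :: _ => some w

-- ===== PRECONDITION & SPEC =====
def Spec_extract_restaurant_type (tags : List (String × String)) (out : Option String) : Prop := out = extract_restaurant_type_alt tags
instance (tags : List (String × String)) (out : Option String) : Decidable (Spec_extract_restaurant_type tags out) := by unfold Spec_extract_restaurant_type; infer_instance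

-- ===== CLAIM (what is proved, stated in full; the proofs are below) =====
def Claim_equal_extract_restaurant_type : Prop := ∀ (tags : List (String × String)), Dom_extract_restaurant_type tags → Spec_extract_restaurant_type tags (extract_restaurant_type tags)

-- ===== LEMMAS AND PROOFS =====
-- B's body, generalized to an arbitrary enumeration start (used only by the proofs)
def pvAltGen (tags : List (String × String)) (s : Int) : Option String :=
  let pairs := PySem.List.enumerate tags s
  match (pairs.filter (fun p => pvIsTrigger p.2.2)).map (·.1) with
  | [] => none
  | first :: _ =>
    match (pairs.filter (fun p => decide (first < p.1) && pvIsNounAdj p.2.2)).map (fun p => p.2.1) with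
    | [] => none
    | w :: _ => some w

theorem pvTrigger_not_target {t : String} (h : pvIsTrigger t = true) : pvIsNounAdj t = false := by
  simp only [pvIsTrigger, Bool.or_eq_true, beq_iff_eq] at h
  rcases h with ((h | h) | h) | h <;> simp [pvIsNounAdj, h]

-- once capturing, A's loop returns the first target word
theorem pvGoA_true (l : List (String × String)) :
    pvGoA l true = ((l.filter (fun p => pvIsNounAdj p.2)).head?).map (·.1) := by
  induction l with
  | nil => rfl
  | cons p rest ih =>
    obtain ⟨w, t⟩ := p
    by_cases h : pvIsTrigger t = true
    · simp [pvGoA, h, pvTrigger_not_target h, ih]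
    · by_cases h2 : pvIsNounAdj t = true
      · simp [pvGoA, h, h2]
      · simp [pvGoA, h, h2, ih]

-- when every enumerated index exceeds i0, the index condition in B's hits is vacuous
theorem pvHits_all (l : List (String × String)) (s i0 : Int) (h : i0 < s) :
    ((PySem.List.enumerate l s).filter (fun p => decide (i0 < p.1) && pvIsNounAdj p.2.2)).map (fun p => p.2.1)
      = (l.filter (fun p => pvIsNounAdj p.2)).map (·.1) := by
  induction l generalizing s with
  | nil => rfl
  | cons p rest ih =>
    obtain ⟨w, t⟩ := p
    have hs : i0 < s + 1 := by omega
    cases h2 : pvIsNounAdj t <;>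
      simp [PySem.List.enumerate_cons, h, h2, ih (s+1) hs]

-- every index produced by enumerate from s is at least s
theorem pvEnum_idx_ge {l : List (String × String)} {s : Int} {p : Int × (String × String)}
    (hp : p ∈ PySem.List.enumerate l s) : s ≤ p.1 := by
  rw [PySem.List.mem_enumerate_iff] at hp
  obtain ⟨k, hk, rfl⟩ := hp
  simp

theorem pvGoA_false_gen (l : List (String × String)) (s : Int) :
    pvGoA l false = pvAltGen l s := by
  induction l generalizing s with
  | nil => rfl
  | cons p rest ih =>
    obtain ⟨w, t⟩ := p
    by_cases h : pvIsTrigger t = true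
    · -- head is the first trigger: B drops it from hits (s < s is false) and takes all later targets
      simp only [pvGoA, h, if_true, pvAltGen, PySem.List.enumerate_cons, List.filter_cons]
      simp only [pvTrigger_not_target h, Bool.and_false, List.map_cons, Bool.false_eq_true,
        if_false]
      rw [pvHits_all rest (s+1) s (by omega), pvGoA_true]
      cases (rest.filter (fun p => pvIsNounAdj p.2)) <;> simp
    · -- non-trigger head: both sides reduce to the tail (any later trigger index exceeds s)
      simp only [pvGoA, h, if_false, Bool.false_eq_true, pvAltGen, PySem.List.enumerate_cons,
        List.filter_cons]
      rw [ih (s+1)]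
      simp only [pvAltGen]
      cases htr : ((PySem.List.enumerate rest (s+1)).filter (fun p => pvIsTrigger p.2.2)).map (·.1) with
      | nil => simp
      | cons i0 is =>
        have hi0 : s + 1 ≤ i0 := by
          have : i0 ∈ ((PySem.List.enumerate rest (s+1)).filter (fun p => pvIsTrigger p.2.2)).map (·.1) := by
            rw [htr]; exact List.mem_cons_self
          obtain ⟨q, hq, rfl⟩ := List.mem_map.mp this
          exact pvEnum_idx_ge (List.mem_of_mem_filter hq)
        have hns : ¬ (i0 < s) := by omega
        simp [hns]

-- ===== VERDICT (by name: the statement is the Claim_ definition above) =====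
theorem extract_restaurant_type_spec : Claim_equal_extract_restaurant_type := by
  intro tags _
  unfold Spec_extract_restaurant_type extract_restaurant_type extract_restaurant_type_alt
  rw [pvGoA_false_gen tags 0]
  rfl
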